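-- pv_equiv track=rewrite | github.com/pshXu/ai-travel-planner | travel_planner_agent/planner.py | _pick_items
-- ===== SOURCE A (Python) =====
-- from typing import Dict, List
--
-- def _pick_items(items: List[Dict], types: List[str], limit: int) -> List[Dict]:
--     if not items:
--         return []
--     selected = []
--     for t in types:
--         for it in items:
--             if it.get("type") == t and it not in selected:
--                 selected.append(it)
--                 if len(selected) >= limit:
--                     return selected
--     # 填充不足
--     for it in items:
--         if it not in selected:
--             selected.append(it)
--             if len(selected) >= limit:
--                 break
--     return selected
-- ===== SOURCE B (Python) =====
-- from typing import Dict, List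
--
-- def _pick_items(items: List[Dict], types: List[str], limit: int) -> List[Dict]:
--     if not items:
--         return []
--     # index the items by type once, instead of rescanning all items per type
--     buckets = {}
--     for it in items:
--         buckets.setdefault(it.get("type"), []).append(it)
--     order = []
--     for t in types:
--         order.extend(buckets.get(t, []))
--     order.extend(items)
--     selected = []
--     for it in order:
--         if it not in selected:
--             selected.append(it)
--             if len(selected) >= limit:
--                 break
--     return selected
-- ===== Notes on version B (the rewrite author's own statement) =====
-- stated objective: faster
-- what changed: B replaces A's nested types-by-items scan with early return plus a separate fill loop by building a type->items bucket index in one pass, concatenating the buckets in types order followed by all items into one candidate list, and running a single dedup-and-limit pass over it.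
import Mathlib
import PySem

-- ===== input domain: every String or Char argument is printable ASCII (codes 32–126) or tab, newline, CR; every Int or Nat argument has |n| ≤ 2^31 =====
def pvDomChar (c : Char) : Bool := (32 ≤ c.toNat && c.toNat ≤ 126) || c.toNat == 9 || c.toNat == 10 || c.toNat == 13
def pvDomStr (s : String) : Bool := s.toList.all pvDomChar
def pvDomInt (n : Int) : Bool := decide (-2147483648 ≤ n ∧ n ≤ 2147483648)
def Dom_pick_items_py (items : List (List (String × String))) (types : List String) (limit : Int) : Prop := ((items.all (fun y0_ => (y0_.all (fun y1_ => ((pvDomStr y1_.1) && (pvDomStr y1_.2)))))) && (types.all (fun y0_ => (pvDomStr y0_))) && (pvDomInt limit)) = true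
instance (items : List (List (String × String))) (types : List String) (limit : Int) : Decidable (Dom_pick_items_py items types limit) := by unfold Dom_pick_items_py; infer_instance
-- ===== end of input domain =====

-- B builds a type->items bucket index once and runs one dedup-and-limit pass over the
-- concatenated candidate order, replacing A's nested scan with early return plus fill loop.

-- it.get("type") on an assoc-list dict (first match; exact on Pre_, which forbids duplicate keys)
def pyGetType (it : List (String × String)) : Option String :=
  (it.find? (fun p => p.1 == "type")).map (·.2)

-- Python '==' on two dicts: same key-value pairs regardless of order; on duplicate-key-free
-- assoc lists this is exactly permutation of the pair lists
def pyDictEq (a b : List (String × String)) : Bool := decide (a.Perm b)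

-- Python 'it in selected' (element-wise dict ==)
def pyMem (it : List (String × String)) (sel : List (List (String × String))) : Bool :=
  sel.any (fun s => pyDictEq s it)

-- ===== PORT A =====
-- inner 'for it in items' of A's first phase, for one type t; Bool = early 'return' taken
def pvPhaseA (limit : Int) (t : String) :
    List (List (String × String)) → List (List (String × String)) →
    Bool × List (List (String × String))
  | [], sel => (false, sel)
  | it :: rest, sel =>
    if pyGetType it == some t && !pyMem it sel then
      let sel' := sel ++ [it]
      if limit ≤ (sel'.length : Int) then (true, sel')
      else pvPhaseA limit t rest sel'
    else pvPhaseA limit t rest sel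

-- outer 'for t in types' of A's first phase
def pvTypesA (limit : Int) (items : List (List (String × String))) :
    List String → List (List (String × String)) →
    Bool × List (List (String × String))
  | [], sel => (false, sel)
  | t :: ts, sel =>
    match pvPhaseA limit t items sel with
    | (true, sel') => (true, sel')
    | (false, sel') => pvTypesA limit items ts sel'

-- A's fill loop ('break' and falling off the end both return selected)
def pvFillA (limit : Int) :
    List (List (String × String)) → List (List (String × String)) →
    List (List (String × String))
  | [], sel => sel
  | it :: rest, sel =>
    if !pyMem it sel then
      let sel' := sel ++ [it]
      if limit ≤ (sel'.length : Int) then sel'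
      else pvFillA limit rest sel'
    else pvFillA limit rest sel

def pick_items_py (items : List (List (String × String))) (types : List String) (limit : Int) : List (List (String × String)) :=
  if items.isEmpty then []
  else
    match pvTypesA limit items types [] with
    | (true, sel) => sel
    | (false, sel) => pvFillA limit items sel

-- ===== PORT B =====
-- buckets.setdefault(it.get("type"), []).append(it) over all items
def pvBucketsB (items : List (List (String × String))) :
    PySem.Dict (Option String) (List (List (String × String))) :=
  items.foldl (fun d it => d.modify (pyGetType it) [] (· ++ [it])) PySem.Dict.empty

-- order = extend per type from the buckets, then extend with all items
def pvOrderB (items : List (List (String × String))) (types : List String) :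
    List (List (String × String)) :=
  (types.foldl (fun acc t => acc ++ (pvBucketsB items).getD (some t) []) []) ++ items

-- B's single dedup-and-limit pass
def pvTakeB (limit : Int) :
    List (List (String × String)) → List (List (String × String)) →
    List (List (String × String))
  | [], sel => sel
  | it :: rest, sel =>
    if !pyMem it sel then
      let sel' := sel ++ [it]
      if limit ≤ (sel'.length : Int) then sel'
      else pvTakeB limit rest sel'
    else pvTakeB limit rest sel

def pick_items_py_alt (items : List (List (String × String))) (types : List String) (limit : Int) : List (List (String × String)) :=
  if items.isEmpty then []
  else pvTakeB limit (pvOrderB items types) []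

-- ===== PRECONDITION & SPEC =====
-- Pre_ excludes items whose pair list repeats a key: such a list is not a faithful assoc-list
-- encoding of a Python dict (dict() collapses duplicates, keeping the last value), so lookup
-- and dict equality on it are not represented by the ports; both Pythons still agree there.
def Pre_pick_items_py (items : List (List (String × String))) (types : List String) (limit : Int) : Prop :=
  ∀ it ∈ items, (it.map Prod.fst).Nodup
instance (items : List (List (String × String))) (types : List String) (limit : Int) : Decidable (Pre_pick_items_py items types limit) := by unfold Pre_pick_items_py; infer_instance

def pvWitness_pick_items_py : (List (List (String × String))) × List String × Int :=
  ([[("type", "food"), ("name", "a")], [("type", "sight")]], ["sight", "food"], 2)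

def Spec_pick_items_py (items : List (List (String × String))) (types : List String) (limit : Int) (out : List (List (String × String))) : Prop := out = pick_items_py_alt items types limit
instance (items : List (List (String × String))) (types : List String) (limit : Int) (out : List (List (String × String))) : Decidable (Spec_pick_items_py items types limit out) := by unfold Spec_pick_items_py; infer_instance

-- ===== CLAIM (what is proved, stated in full; the proofs are below) =====
def Claim_equal_pick_items_py : Prop := ∀ (items : List (List (String × String))) (types : List String) (limit : Int), Dom_pick_items_py items types limit → Pre_pick_items_py items types limit → Spec_pick_items_py items types limit (pick_items_py items types limit)

-- ===== LEMMAS AND PROOFS =====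

-- proof-side core loop: one dedup-and-limit pass returning the early-exit flag as well
def pvCore (limit : Int) :
    List (List (String × String)) → List (List (String × String)) →
    Bool × List (List (String × String))
  | [], sel => (false, sel)
  | it :: rest, sel =>
    if !pyMem it sel then
      let sel' := sel ++ [it]
      if limit ≤ (sel'.length : Int) then (true, sel')
      else pvCore limit rest sel'
    else pvCore limit rest sel

theorem phaseA_eq_core (limit : Int) (t : String) :
    ∀ (its : List (List (String × String))) sel,
      pvPhaseA limit t its sel =
        pvCore limit (its.filter (fun it => pyGetType it == some t)) sel := by
  intro its
  induction its with
  | nil => intro sel; rfl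
  | cons it rest ih =>
    intro sel
    by_cases ht : (pyGetType it == some t) = true
    · simp only [pvPhaseA, List.filter_cons, if_pos, ht, Bool.true_and, pvCore]
      by_cases hm : pyMem it sel = true
      · simp [hm, ih]
      · simp only [Bool.not_eq_true] at hm
        simp only [hm, Bool.not_false, if_pos]
        split_ifs with hl
        · rfl
        · exact ih _
    · simp only [Bool.not_eq_true] at ht
      simp [pvPhaseA, List.filter_cons, ht, ih]

theorem core_append (limit : Int) :
    ∀ (xs ys : List (List (String × String))) sel,
      pvCore limit (xs ++ ys) sel =
        match pvCore limit xs sel with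
        | (true, s) => (true, s)
        | (false, s) => pvCore limit ys s := by
  intro xs
  induction xs with
  | nil => intro ys sel; rfl
  | cons it rest ih =>
    intro ys sel
    simp only [List.cons_append, pvCore]
    split_ifs with hm hl
    · rfl
    · exact ih _ _
    · exact ih _ _

theorem typesA_eq_core (limit : Int) (items : List (List (String × String))) :
    ∀ (ts : List String) sel,
      pvTypesA limit items ts sel =
        pvCore limit (ts.flatMap (fun t => items.filter (fun it => pyGetType it == some t))) sel := by
  intro ts
  induction ts with
  | nil => intro sel; rfl
  | cons t rest ih =>
    intro sel
    simp only [pvTypesA, List.flatMap_cons, core_append, phaseA_eq_core]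
    cases pvCore limit (items.filter (fun it => pyGetType it == some t)) sel with
    | mk b s => cases b <;> simp [ih]

theorem fillA_eq_core (limit : Int) :
    ∀ (its : List (List (String × String))) sel,
      pvFillA limit its sel = (pvCore limit its sel).2 := by
  intro its
  induction its with
  | nil => intro sel; rfl
  | cons it rest ih =>
    intro sel
    simp only [pvFillA, pvCore]
    split_ifs <;> simp [ih]

theorem takeB_eq_core (limit : Int) :
    ∀ (its : List (List (String × String))) sel,
      pvTakeB limit its sel = (pvCore limit its sel).2 := by
  intro its
  induction its with
  | nil => intro sel; rfl
  | cons it rest ih =>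
    intro sel
    simp only [pvTakeB, pvCore]
    split_ifs <;> simp [ih]

theorem bucketsB_getD (items : List (List (String × String))) (t : String) :
    (pvBucketsB items).getD (some t) [] =
      items.filter (fun it => pyGetType it == some t) := by
  have h : pvBucketsB items =
      (items.map (fun it => (pyGetType it, it))).foldl
        (fun d p => d.modify p.1 [] (· ++ [p.2])) PySem.Dict.empty := by
    simp [pvBucketsB, List.foldl_map]
  rw [h, PySem.Dict.getD_foldl_modify_append]
  have h2 : ((fun (x : Option String × List (String × String)) => x.2) ∘
      fun it => (pyGetType it, it)) = id := rfl
  have h3 : ((fun (p : Option String × List (String × String)) => p.1 == some t) ∘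
      fun it => (pyGetType it, it)) = fun it => pyGetType it == some t := rfl
  simp [List.filter_map, List.map_map, h2, h3]

theorem orderB_eq (items : List (List (String × String))) (types : List String) :
    pvOrderB items types =
      (types.flatMap (fun t => items.filter (fun it => pyGetType it == some t))) ++ items := by
  unfold pvOrderB
  congr 1
  have := PySem.List.foldl_append_eq_flatMap
    (l := types) (acc := ([] : List (List (String × String))))
    (g := fun t => (pvBucketsB items).getD (some t) [])
  rw [this]
  simp [bucketsB_getD]

-- ===== VERDICT (by name: the statement is the Claim_ definition above) =====
theorem pick_items_py_spec : Claim_equal_pick_items_py := by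
  intro items types limit _ _
  unfold Spec_pick_items_py pick_items_py pick_items_py_alt
  by_cases he : items.isEmpty
  · simp [he]
  · simp only [he, if_neg, Bool.false_eq_true, not_false_iff]
    rw [typesA_eq_core, takeB_eq_core, orderB_eq, core_append]
    cases h : pvCore limit (types.flatMap (fun t => items.filter (fun it => pyGetType it == some t))) [] with
    | mk b s => cases b <;> simp [fillA_eq_core]
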